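-- pv_equiv track=rewrite | github.com/PabloBerucm/project_1_GIW | pr2_skel.py | accidentes_por_distrito_tipo
-- ===== SOURCE A (Python) =====
-- def accidentes_por_distrito_tipo(datos):
--     #función que devuelve un diccionario pasando el de lee_fichero_accidentes
--     #devolviendo otro diccionario que contée los accidentes por distrito
--     dicc_sol = {}
--
--     for item in datos:
--         #estandarizamos el texto a la salida buscada por el ejercicio
--         distrito = item['distrito'].strip().upper()
--         tipo = item['tipo_accidente'].strip()
--
--         clave = (distrito, tipo)
--
--         #si ya existe la clave en nuestro diccionario añadiremos un accidente
--         #como valor, de lo contrario, lo añadiremos al diccionario con un 1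
--         if clave in dicc_sol:
--             dicc_sol[clave] += 1
--         else:
--             dicc_sol[clave] = 1
--     #devolveremos el diccionario generado
--     return dicc_sol
-- ===== SOURCE B (Python) =====
-- def accidentes_por_distrito_tipo(datos):
--     # Alternative decomposition: map items to standardized keys, dedup keys in
--     # first-occurrence order, then count each key once with list.count.
--     claves = [(item['distrito'].strip().upper(), item['tipo_accidente'].strip())
--               for item in datos]
--     return {clave: claves.count(clave) for clave in dict.fromkeys(claves)}
-- ===== Notes on version B (the rewrite author's own statement) =====
-- stated objective: alternative
-- what changed: Replaces A's incremental dict-update loop (membership test, then += or init) by a three-stage pipeline: map items to standardized keys, ordered-dedup the keys with dict.fromkeys, and build the result with one list.count per distinct key.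
import Mathlib
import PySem

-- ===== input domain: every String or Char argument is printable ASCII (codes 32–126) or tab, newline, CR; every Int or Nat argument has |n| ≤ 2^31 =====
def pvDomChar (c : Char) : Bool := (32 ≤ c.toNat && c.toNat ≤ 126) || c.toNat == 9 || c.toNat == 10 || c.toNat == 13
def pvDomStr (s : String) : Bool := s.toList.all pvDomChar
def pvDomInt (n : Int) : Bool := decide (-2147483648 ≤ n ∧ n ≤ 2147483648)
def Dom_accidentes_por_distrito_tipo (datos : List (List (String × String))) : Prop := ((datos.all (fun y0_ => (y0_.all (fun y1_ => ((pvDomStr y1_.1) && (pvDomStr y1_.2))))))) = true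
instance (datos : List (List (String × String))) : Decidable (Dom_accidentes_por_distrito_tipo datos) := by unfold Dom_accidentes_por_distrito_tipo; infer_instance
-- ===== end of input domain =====

-- B replaces A's incremental count-update loop by a map/ordered-dedup/count pipeline (alternative decomposition, same results).

-- ===== PORT A =====
-- missing keys (Python KeyError) are excluded by Pre_; the '' default is unreachable there
def accidentes_por_distrito_tipo (datos : List (List (String × String))) : List (String × String × Int) :=
  let dicc_sol : PySem.Dict (String × String) Int :=
    datos.foldl (fun dicc_sol item =>
      let distrito := PySem.Str.upper (PySem.Str.strip ((PySem.Dict.mk item).getD "distrito" ""))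
      let tipo := PySem.Str.strip ((PySem.Dict.mk item).getD "tipo_accidente" "")
      let clave := (distrito, tipo)
      if dicc_sol.contains clave then
        dicc_sol.insert clave (dicc_sol.getD clave 0 + 1)
      else
        dicc_sol.insert clave 1) PySem.Dict.empty
  dicc_sol.items.map (fun p => (p.1.1, p.1.2, p.2))

-- ===== PORT B =====
def accidentes_por_distrito_tipo_alt (datos : List (List (String × String))) : List (String × String × Int) :=
  let claves := datos.map (fun item =>
    (PySem.Str.upper (PySem.Str.strip ((PySem.Dict.mk item).getD "distrito" "")),
     PySem.Str.strip ((PySem.Dict.mk item).getD "tipo_accidente" "")))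
  (PySem.List.dedup claves).map (fun clave => (clave.1, clave.2, (claves.count clave : Int)))

-- ===== PRECONDITION & SPEC =====
-- Pre_ excludes exactly the inputs where A raises KeyError: an item lacking 'distrito' or 'tipo_accidente'.
def Pre_accidentes_por_distrito_tipo (datos : List (List (String × String))) : Prop :=
  ∀ item ∈ datos, (PySem.Dict.mk item).contains "distrito" = true ∧ (PySem.Dict.mk item).contains "tipo_accidente" = true
instance (datos : List (List (String × String))) : Decidable (Pre_accidentes_por_distrito_tipo datos) := by unfold Pre_accidentes_por_distrito_tipo; infer_instance

def pvWitness_accidentes_por_distrito_tipo : (List (List (String × String))) :=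
  [[("distrito", " centro "), ("tipo_accidente", "colision")], [("distrito", "CENTRO"), ("tipo_accidente", "colision")]]

def Spec_accidentes_por_distrito_tipo (datos : List (List (String × String))) (out : List (String × String × Int)) : Prop := out = accidentes_por_distrito_tipo_alt datos
instance (datos : List (List (String × String))) (out : List (String × String × Int)) : Decidable (Spec_accidentes_por_distrito_tipo datos out) := by unfold Spec_accidentes_por_distrito_tipo; infer_instance

-- ===== CLAIM (what is proved, stated in full; the proofs are below) =====
def Claim_equal_accidentes_por_distrito_tipo : Prop := ∀ (datos : List (List (String × String))), Dom_accidentes_por_distrito_tipo datos → Pre_accidentes_por_distrito_tipo datos → Spec_accidentes_por_distrito_tipo datos (accidentes_por_distrito_tipo datos)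

-- ===== LEMMAS AND PROOFS =====

-- A's loop body is the Counter step: when the key is absent getD gives 0, so both branches insert getD+1
theorem foldl_count_eq_counter {a k : Type} [BEq k] [LawfulBEq k] (key : a -> k) (l : List a) :
    l.foldl (fun d item =>
      let c := key item
      if d.contains c then d.insert c (d.getD c 0 + 1) else d.insert c 1) PySem.Dict.empty
    = PySem.Dict.counter (l.map key) := by
  rw [<- PySem.Dict.foldl_insert_getD_add_one_eq_counter, List.foldl_map]
  apply PySem.List.foldl_congr_mem
  intro acc x _
  by_cases h : acc.contains (key x)
  . simp [h]
  . simp only [h, Bool.false_eq_true, if_false]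
    rw [PySem.Dict.getD_of_not_contains (h := by simpa using h)]; norm_num

-- ===== VERDICT (by name: the statement is the Claim_ definition above) =====
theorem accidentes_por_distrito_tipo_spec : Claim_equal_accidentes_por_distrito_tipo := by
  intro datos _ _
  unfold Spec_accidentes_por_distrito_tipo accidentes_por_distrito_tipo accidentes_por_distrito_tipo_alt
  rw [foldl_count_eq_counter (key := fun item =>
    (PySem.Str.upper (PySem.Str.strip ((PySem.Dict.mk item).getD "distrito" "")),
     PySem.Str.strip ((PySem.Dict.mk item).getD "tipo_accidente" "")))]
  simp only [PySem.Dict.items_counter, List.map_map, PySem.List.dedup_eq_ofList]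
  rfl
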